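-- pv_equiv track=rewrite | github.com/tlamadon/bipartitepandas | bipartitepandas/util.py | _sort_cols
-- ===== SOURCE A (Python) =====
-- def _text_num_split(col_name):
--     '''
--     Split column name into string and number components. Source: https://stackoverflow.com/a/55843049/17333120.
--
--     Arguments:
--         col_name (str): column name
--
--     Returns:
--         (list): first entry is column name string component; second entry is column number component
--     '''
--     for index, char in enumerate(col_name):
--         if char.isdigit():
--             return (col_name[: index], col_name[index:])
--     return (col_name, '')
--
-- def _sort_cols(cols):
--     '''
--     Sort columns. Prioritize default columns, then sort alphabetically.
--
--     Arguments:
--         cols (list of str): list of column names to be sorted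
--
--     Returns:
--         (list): sorted columns
--     '''
--     default_cols = ['i', 'j', 'y', 't', 'g', 'w', 'm'] #, 'cs', 'l', 'k', 'alpha', 'psi', 'alpha_hat', 'psi_hat']
--
--     default_cols_dict = {}
--     custom_cols_dict = {}
--
--     for col in cols:
--         col_str, col_num = _text_num_split(col)
--         if col_str in default_cols:
--             # If column is a default column
--             if col_str in default_cols_dict.keys():
--                 # If column already seen
--                 default_cols_dict[col_str].append(col)
--             else:
--                 # If column not already seen
--                 default_cols_dict[col_str] = [col]
--         else:
--             # If column is a custom column
--             if col_str in custom_cols_dict.keys():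
--                 # If column already seen
--                 custom_cols_dict[col_str].append(col)
--             else:
--                 # If column not already seen
--                 custom_cols_dict[col_str] = [col]
--
--     # Sort default and custom columns
--     sorted_default_cols = [sorted_default_col for default_col in sorted(default_cols_dict.keys(), key=default_cols.index) for sorted_default_col in sorted(default_cols_dict[default_col])]
--     sorted_custom_cols = [sorted_custom_col for custom_col in sorted(custom_cols_dict.keys()) for sorted_custom_col in sorted(custom_cols_dict[custom_col])]
--
--     return sorted_default_cols + sorted_custom_cols
-- ===== SOURCE B (Python) =====
-- def _sort_cols(cols):
--     '''
--     Sort columns: default columns first (in their fixed priority order), then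
--     custom columns alphabetically by their string component, each group sorted
--     by full name. Implemented as three stable sorted() passes (no grouping dicts).
--     '''
--     default_cols = ['i', 'j', 'y', 't', 'g', 'w', 'm']
--
--     def _str_part(col):
--         for i, ch in enumerate(col):
--             if ch.isdigit():
--                 return col[:i]
--         return col
--
--     def _rank(col):
--         s = _str_part(col)
--         return default_cols.index(s) if s in default_cols else len(default_cols)
--
--     out = sorted(cols)                       # tertiary: full name
--     out = sorted(out, key=_str_part)         # secondary: string component
--     return sorted(out, key=_rank)            # primary: default priority / custom
-- ===== Notes on version B (the rewrite author's own statement) =====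
-- stated objective: simpler
-- what changed: Replaced the two grouping dictionaries and the nested sorting comprehensions by three stable sorted() passes (full name, then string component, then default-column rank), i.e. a lexicographic composite key realised by stability.
import Mathlib
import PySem

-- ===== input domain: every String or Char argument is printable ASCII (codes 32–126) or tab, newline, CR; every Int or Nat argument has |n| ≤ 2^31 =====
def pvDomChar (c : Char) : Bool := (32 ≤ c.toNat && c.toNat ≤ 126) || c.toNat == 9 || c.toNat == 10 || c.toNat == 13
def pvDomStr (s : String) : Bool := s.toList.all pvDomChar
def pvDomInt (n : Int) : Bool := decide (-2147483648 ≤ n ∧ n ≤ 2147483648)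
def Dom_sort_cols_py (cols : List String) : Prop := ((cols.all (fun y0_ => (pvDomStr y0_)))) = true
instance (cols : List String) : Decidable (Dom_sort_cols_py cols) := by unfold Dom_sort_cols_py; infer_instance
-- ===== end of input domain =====

-- B replaces A's two grouping dictionaries and nested sorting comprehensions by three stable
-- sorted passes realising the composite key (default-rank, string part, full name): simpler, same cost.


-- ===== PORT A =====
-- the module constant default_cols (shared verbatim by both Python versions)
def pvDefaultCols : List String := ["i", "j", "y", "t", "g", "w", "m"]

-- _text_num_split's scan: first digit splits the char list (col_name[:index], col_name[index:])
def pvTnsChars : List Char → List Char × List Char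
  | [] => ([], [])
  | c :: rest =>
    if PySem.Chars.isdigit c then ([], c :: rest)
    else
      let p := pvTnsChars rest
      (c :: p.1, p.2)

def text_num_split (col_name : String) : String × String :=
  let p := pvTnsChars col_name.toList
  (String.mk p.1, String.mk p.2)

-- one dict update of A's loop body ('append if seen, else start a new group')
def pvUpdA (d : PySem.Dict String (List String)) (colStr col : String) :
    PySem.Dict String (List String) :=
  if d.contains colStr then d.modify colStr [] (fun v => v ++ [col])
  else d.insert colStr [col]

-- default_cols.index(k); the keys sorted with this key are always members, so .index cannot raise
def pvIdxA (k : String) : Int := ((PySem.List.index? pvDefaultCols k).getD 0 : Int)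

def sort_cols_py (cols : List String) : List String :=
  let dicts :=
    cols.foldl
      (fun (st : PySem.Dict String (List String) × PySem.Dict String (List String)) col =>
        let colStr := (text_num_split col).1
        if pvDefaultCols.contains colStr then (pvUpdA st.1 colStr col, st.2)
        else (st.1, pvUpdA st.2 colStr col))
      (PySem.Dict.empty, PySem.Dict.empty)
  let sortedDefaultCols :=
    (PySem.List.sorted dicts.1.keys pvIdxA).flatMap
      (fun k => PySem.List.sorted (dicts.1.getD k []) (fun x => x))
  let sortedCustomCols :=
    (PySem.List.sorted dicts.2.keys (fun k => k)).flatMap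
      (fun k => PySem.List.sorted (dicts.2.getD k []) (fun x => x))
  sortedDefaultCols ++ sortedCustomCols

-- ===== PORT B =====
-- B's _str_part: the prefix of col before its first digit
def pvSpChars : List Char → List Char
  | [] => []
  | c :: rest => if PySem.Chars.isdigit c then [] else c :: pvSpChars rest

def pvStrPart (col : String) : String := String.mk (pvSpChars col.toList)

-- B's _rank: default_cols.index(s) if s in default_cols else len(default_cols); the index call
-- happens only under the membership guard, so .index cannot raise
def pvRank (col : String) : Int :=
  let s := pvStrPart col
  if pvDefaultCols.contains s then ((PySem.List.index? pvDefaultCols s).getD 0 : Int)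
  else (pvDefaultCols.length : Int)

def sort_cols_py_alt (cols : List String) : List String :=
  PySem.List.sorted (PySem.List.sorted (PySem.List.sorted cols (fun x => x)) pvStrPart) pvRank

-- ===== PRECONDITION & SPEC =====
def Spec_sort_cols_py (cols : List String) (out : List String) : Prop := out = sort_cols_py_alt cols
instance (cols : List String) (out : List String) : Decidable (Spec_sort_cols_py cols out) := by unfold Spec_sort_cols_py; infer_instance

-- ===== CLAIM (what is proved, stated in full; the proofs are below) =====
def Claim_equal_sort_cols_py : Prop := ∀ (cols : List String), Dom_sort_cols_py cols → Spec_sort_cols_py cols (sort_cols_py cols)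

-- ===== LEMMAS AND PROOFS =====

-- the composite sort key both results are ordered by (lexicographically)
def pvKey (c : String) : Lex (Int × Lex (String × String)) :=
  toLex (pvRank c, toLex (pvStrPart c, c))

theorem pvKey_injective : Function.Injective pvKey := by
  intro a b h
  exact congrArg (fun x => (ofLex (ofLex x).2).2) h

theorem pvTnsChars_fst (cs : List Char) : (pvTnsChars cs).1 = pvSpChars cs := by
  induction cs with
  | nil => rfl
  | cons c rest ih =>
    simp only [pvTnsChars, pvSpChars]
    split <;> simp [ih]

theorem text_num_split_fst (c : String) : (text_num_split c).1 = pvStrPart c := by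
  simp [text_num_split, pvStrPart, pvTnsChars_fst]

-- ---- stability of PySem.List.sorted ----

theorem insertBy_pairwise_stable {α κ : Type} [LinearOrder κ] (k : α → κ) (R : α → α → Prop)
    (x : α) : ∀ acc : List α,
    acc.Pairwise (fun a b => k a < k b ∨ (k a = k b ∧ R a b)) →
    (∀ y ∈ acc, R y x) →
    (PySem.List.insertBy (fun a b => decide (k a < k b)) x acc).Pairwise
      (fun a b => k a < k b ∨ (k a = k b ∧ R a b)) := by
  intro acc
  induction acc with
  | nil => intro _ _; simp [PySem.List.insertBy]
  | cons y ys ih =>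
    intro hp hR
    rw [List.pairwise_cons] at hp
    obtain ⟨hy, hys⟩ := hp
    simp only [PySem.List.insertBy]
    split
    · rename_i hlt
      rw [decide_eq_true_iff] at hlt
      refine List.Pairwise.cons ?_ (List.Pairwise.cons hy hys)
      intro z hz
      rcases List.mem_cons.mp hz with rfl | hz
      · exact Or.inl hlt
      · rcases hy z hz with h | ⟨h, _⟩
        · exact Or.inl (lt_trans hlt h)
        · exact Or.inl (h ▸ hlt)
    · rename_i hnlt
      rw [decide_eq_true_iff, not_lt] at hnlt
      refine List.Pairwise.cons ?_ (ih hys (fun z hz => hR z (List.mem_cons_of_mem _ hz)))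
      intro z hz
      rw [PySem.List.mem_insertBy] at hz
      rcases hz with rfl | hz
      · rcases lt_or_eq_of_le hnlt with h | h
        · exact Or.inl h
        · exact Or.inr ⟨h, hR y (List.mem_cons_self ..)⟩
      · exact hy z hz

theorem foldl_insertBy_pairwise_stable {α κ : Type} [LinearOrder κ] (k : α → κ)
    (R : α → α → Prop) : ∀ (l acc : List α),
    acc.Pairwise (fun a b => k a < k b ∨ (k a = k b ∧ R a b)) →
    (∀ x ∈ l, ∀ y ∈ acc, R y x) → l.Pairwise R →
    (l.foldl (fun acc x => PySem.List.insertBy (fun a b => decide (k a < k b)) x acc) acc).Pairwise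
      (fun a b => k a < k b ∨ (k a = k b ∧ R a b)) := by
  intro l
  induction l with
  | nil => intro acc hp _ _; simpa using hp
  | cons x t ih =>
    intro acc hp hRl hl
    rw [List.pairwise_cons] at hl
    simp only [List.foldl_cons]
    refine ih _ (insertBy_pairwise_stable k R x acc hp
      (fun y hy => hRl x (List.mem_cons_self ..) y hy)) ?_ hl.2
    intro z hz y hy
    rw [PySem.List.mem_insertBy] at hy
    rcases hy with rfl | hy
    · exact hl.1 z hz
    · exact hRl z (List.mem_cons_of_mem _ hz) y hy

theorem sorted_pairwise_stable {α κ : Type} [LinearOrder κ] (k : α → κ) (R : α → α → Prop)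
    (l : List α) (h : l.Pairwise R) :
    (PySem.List.sorted l k).Pairwise (fun a b => k a < k b ∨ (k a = k b ∧ R a b)) := by
  rw [PySem.List.sorted_eq_foldl_insertBy]
  exact foldl_insertBy_pairwise_stable k R l [] (by simp) (by simp) h

-- ---- B's output: a permutation of cols, pairwise increasing under pvKey ----

theorem alt_perm (cols : List String) : (sort_cols_py_alt cols).Perm cols := by
  unfold sort_cols_py_alt
  exact ((PySem.List.sorted_perm _ _ _).trans (PySem.List.sorted_perm _ _ _)).trans
    (PySem.List.sorted_perm _ _ _)

theorem alt_pairwise (cols : List String) :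
    (sort_cols_py_alt cols).Pairwise (fun a b => pvKey a ≤ pvKey b) := by
  unfold sort_cols_py_alt
  have h1 : (PySem.List.sorted cols (fun x => x)).Pairwise (fun a b => a ≤ b) :=
    PySem.List.sorted_pairwise cols (fun x => x)
  have h2 := sorted_pairwise_stable pvStrPart (fun a b => a ≤ b) _ h1
  have h3 := sorted_pairwise_stable pvRank _ _ h2
  refine h3.imp ?_
  intro a b h
  simp only [pvKey, Prod.Lex.le_iff, ofLex_toLex]
  rcases h with h | ⟨h, h' | ⟨h', h''⟩⟩
  · exact Or.inl h
  · exact Or.inr ⟨h, Or.inl h'⟩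
  · exact Or.inr ⟨h, Or.inr ⟨h', h''⟩⟩

-- ---- facts about default_cols ----

theorem mem_defaultCols_cases {k : String} (h : k ∈ pvDefaultCols) :
    k = "i" ∨ k = "j" ∨ k = "y" ∨ k = "t" ∨ k = "g" ∨ k = "w" ∨ k = "m" := by
  simpa [pvDefaultCols] using h

theorem pvIdxA_lt {k : String} (h : k ∈ pvDefaultCols) : pvIdxA k < 7 := by
  rcases mem_defaultCols_cases h with rfl | rfl | rfl | rfl | rfl | rfl | rfl <;> decide

theorem pvIdxA_inj {k k' : String} (h : k ∈ pvDefaultCols) (h' : k' ∈ pvDefaultCols)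
    (he : pvIdxA k = pvIdxA k') : k = k' := by
  rcases mem_defaultCols_cases h with rfl | rfl | rfl | rfl | rfl | rfl | rfl <;>
    rcases mem_defaultCols_cases h' with rfl | rfl | rfl | rfl | rfl | rfl | rfl <;>
      first | rfl | (exfalso; revert he; decide)

theorem pvRank_of_default {c : String} (h : pvStrPart c ∈ pvDefaultCols) :
    pvRank c = pvIdxA (pvStrPart c) := by
  simp [pvRank, pvIdxA, h]

theorem pvRank_of_custom {c : String} (h : pvStrPart c ∉ pvDefaultCols) :
    pvRank c = 7 := by
  have h' : pvDefaultCols.contains (pvStrPart c) = false := by simpa using h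
  simp only [pvRank, h', Bool.false_eq_true, if_false]
  rfl

-- ---- A's dicts: characterisation of the grouping loop ----

def pvIsDef (c : String) : Bool := pvDefaultCols.contains (pvStrPart c)

def pvGroupDict (l : List String) : PySem.Dict String (List String) :=
  l.foldl (fun d c => d.modify (pvStrPart c) [] (fun v => v ++ [c])) PySem.Dict.empty

theorem pvUpdA_eq_modify (d : PySem.Dict String (List String)) (s c : String) :
    pvUpdA d s c = d.modify s [] (fun v => v ++ [c]) := by
  unfold pvUpdA
  by_cases h : d.contains s = true
  · simp [h]
  · simp only [Bool.not_eq_true] at h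
    simp [h, PySem.Dict.modify, PySem.Dict.getD_of_not_contains d [] h]

theorem dicts_eq (cols : List String) :
    cols.foldl
      (fun (st : PySem.Dict String (List String) × PySem.Dict String (List String)) col =>
        let colStr := (text_num_split col).1
        if pvDefaultCols.contains colStr then (pvUpdA st.1 colStr col, st.2)
        else (st.1, pvUpdA st.2 colStr col))
      (PySem.Dict.empty, PySem.Dict.empty)
    = (pvGroupDict (cols.filter pvIsDef), pvGroupDict (cols.filter (fun c => !pvIsDef c))) := by
  unfold pvGroupDict
  rw [← PySem.List.foldl_if_eq_foldl_filter pvIsDef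
      (fun (d : PySem.Dict String (List String)) c =>
        d.modify (pvStrPart c) [] (fun v => v ++ [c])) cols,
    ← PySem.List.foldl_if_eq_foldl_filter (fun c => !pvIsDef c)
      (fun (d : PySem.Dict String (List String)) c =>
        d.modify (pvStrPart c) [] (fun v => v ++ [c])) cols,
    ← PySem.List.foldl_prod_mk]
  refine PySem.List.foldl_congr_mem cols _ _ _ ?_
  intro st col _
  simp only [text_num_split_fst, pvUpdA_eq_modify, pvIsDef]
  by_cases h : pvDefaultCols.contains (pvStrPart col) = true
  · have hm : pvStrPart col ∈ pvDefaultCols := by simpa using h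
    rw [if_pos h, if_pos h, if_neg (by simp [hm])]
  · have h' : pvDefaultCols.contains (pvStrPart col) = false := by simpa using h
    have hnm : pvStrPart col ∉ pvDefaultCols := by simpa using h'
    rw [if_neg h, if_neg h, if_pos (by simp [hnm])]

theorem pvGroupDict_getD (l : List String) (k : String) :
    (pvGroupDict l).getD k [] = l.filter (fun c => pvStrPart c == k) := by
  have h := PySem.Dict.getD_foldl_modify_append (l.map (fun c => (pvStrPart c, c)))
    PySem.Dict.empty k
  rw [List.foldl_map] at h
  simpa [pvGroupDict, List.filter_map, Function.comp_def] using h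

theorem pvGroupDict_keys (l : List String) :
    (pvGroupDict l).keys = PySem.Set.ofList (l.map pvStrPart) :=
  PySem.Dict.keys_foldl_modify_key l pvStrPart [] (fun _ c v => v ++ [c]) PySem.Dict.empty

theorem pvGroupDict_keys_nodup (l : List String) : (pvGroupDict l).keys.Nodup := by
  rw [pvGroupDict_keys]; exact PySem.Set.nodup_ofList _

theorem mem_pvGroupDict_keys {l : List String} {k : String} :
    k ∈ (pvGroupDict l).keys ↔ k ∈ l.map pvStrPart := by
  rw [pvGroupDict_keys]; exact PySem.Set.mem_ofList ..

-- ---- the partition permutation ----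

theorem flatMap_filter_perm (sp : String → String) :
    ∀ (ks l : List String), ks.Nodup → (∀ c ∈ l, sp c ∈ ks) →
    (ks.flatMap (fun k => l.filter (fun c => sp c == k))).Perm l := by
  intro ks
  induction ks with
  | nil =>
    intro l _ hcov
    have : l = [] := by
      cases l with
      | nil => rfl
      | cons c t => exact absurd (hcov c (List.mem_cons_self ..)) (by simp)
    simp [this]
  | cons k ks ih =>
    intro l hnd hcov
    rw [List.nodup_cons] at hnd
    simp only [List.flatMap_cons]
    have hcomp : ∀ k' ∈ ks, l.filter (fun c => sp c == k')
        = (l.filter (fun c => !(sp c == k))).filter (fun c => sp c == k') := by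
      intro k' hk'
      rw [List.filter_filter]
      refine (List.filter_congr ?_).symm
      intro c _
      have hkk : ¬ k' = k := fun he => hnd.1 (he ▸ hk')
      by_cases h : sp c = k'
      · simp [h, hkk]
      · simp [h]
    have hflat : ks.flatMap (fun k' => l.filter (fun c => sp c == k'))
        = ks.flatMap (fun k' => (l.filter (fun c => !(sp c == k))).filter
            (fun c => sp c == k')) := by
      rw [List.flatMap_def, List.flatMap_def]
      exact congrArg List.flatten (List.map_congr_left hcomp)
    rw [hflat]
    have hcov' : ∀ c ∈ l.filter (fun c => !(sp c == k)), sp c ∈ ks := by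
      intro c hc
      rw [List.mem_filter] at hc
      have h2 : ¬ sp c = k := by simpa using hc.2
      rcases List.mem_cons.mp (hcov c hc.1) with h | h
      · exact absurd h h2
      · exact h
    exact (List.Perm.append_left _ (ih _ hnd.2 hcov')).trans (List.filter_append_perm _ l)

-- ---- A's two halves: permutations and pairwise order ----

theorem half_perm {kappa : Type} [LinearOrder kappa] (l : List String) (key : String → kappa)
    (hcov : ∀ c ∈ l, pvStrPart c ∈ (pvGroupDict l).keys) :
    ((PySem.List.sorted (pvGroupDict l).keys key).flatMap
      (fun k => PySem.List.sorted ((pvGroupDict l).getD k []) (fun x => x))).Perm l := by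
  have h1 : ((PySem.List.sorted (pvGroupDict l).keys key).flatMap
      (fun k => PySem.List.sorted ((pvGroupDict l).getD k []) (fun x => x))).Perm
      ((pvGroupDict l).keys.flatMap (fun k => (pvGroupDict l).getD k [])) :=
    List.Perm.flatMap (PySem.List.sorted_perm _ _ _)
      (fun k _ => PySem.List.sorted_perm _ _ _)
  refine h1.trans ?_
  have h2 : (pvGroupDict l).keys.flatMap (fun k => (pvGroupDict l).getD k [])
      = (pvGroupDict l).keys.flatMap (fun k => l.filter (fun c => pvStrPart c == k)) := by
    rw [List.flatMap_def, List.flatMap_def]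
    exact congrArg List.flatten (List.map_congr_left (fun k _ => pvGroupDict_getD l k))
  rw [h2]
  exact flatMap_filter_perm pvStrPart _ l (pvGroupDict_keys_nodup l) hcov

-- members of a sorted group with key k lie in l and have string part k
theorem mem_group {l : List String} {k c : String}
    (hc : c ∈ PySem.List.sorted ((pvGroupDict l).getD k []) (fun x => x)) :
    c ∈ l ∧ pvStrPart c = k := by
  rw [PySem.List.mem_sorted, pvGroupDict_getD, List.mem_filter] at hc
  exact ⟨hc.1, by simpa using hc.2⟩

theorem half_pairwise {kappa : Type} [LinearOrder kappa] (l : List String) (key : String → kappa)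
    (hkeys : (PySem.List.sorted (pvGroupDict l).keys key).Pairwise
      (fun k1 k2 => ∀ x ∈ l, ∀ y ∈ l, pvStrPart x = k1 → pvStrPart y = k2 → pvKey x < pvKey y))
    (hgrp : ∀ k x y, x ∈ l → y ∈ l → pvStrPart x = k → pvStrPart y = k → x ≤ y →
      pvKey x ≤ pvKey y) :
    ((PySem.List.sorted (pvGroupDict l).keys key).flatMap
      (fun k => PySem.List.sorted ((pvGroupDict l).getD k []) (fun x => x))).Pairwise
      (fun a b => pvKey a ≤ pvKey b) := by
  rw [List.flatMap_def, List.pairwise_flatten]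
  constructor
  · intro g hg
    rw [List.mem_map] at hg
    obtain ⟨k, hk, rfl⟩ := hg
    have hsorted : (PySem.List.sorted ((pvGroupDict l).getD k []) (fun x => x)).Pairwise
        (fun a b => a ≤ b) := PySem.List.sorted_pairwise _ _
    refine hsorted.imp_of_mem ?_
    intro a b ha hb hab
    obtain ⟨hal, hak⟩ := mem_group ha
    obtain ⟨hbl, hbk⟩ := mem_group hb
    exact hgrp k a b hal hbl hak hbk hab
  · rw [List.pairwise_map]
    refine hkeys.imp ?_
    intro k1 k2 h x hx y hy
    obtain ⟨hxl, hxk⟩ := mem_group hx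
    obtain ⟨hyl, hyk⟩ := mem_group hy
    exact le_of_lt (h x hxl y hyl hxk hyk)

-- sorted keys of a Nodup list with a key injective on it are strictly increasing
theorem sorted_keys_strict {kappa : Type} [LinearOrder kappa] (ks : List String)
    (key : String → kappa) (hnd : ks.Nodup)
    (hinj : ∀ k ∈ ks, ∀ k' ∈ ks, key k = key k' → k = k') :
    (PySem.List.sorted ks key).Pairwise (fun k1 k2 => key k1 < key k2) := by
  have hle : (PySem.List.sorted ks key).Pairwise (fun k1 k2 => key k1 ≤ key k2) :=
    PySem.List.sorted_pairwise _ _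
  have hnd' : (PySem.List.sorted ks key).Nodup :=
    ((PySem.List.sorted_perm ks key false).nodup_iff).mpr hnd
  refine (hle.and hnd').imp_of_mem ?_
  intro a b ha hb h
  rcases lt_or_eq_of_le h.1 with hlt | heq
  · exact hlt
  · exact absurd (hinj a (by rw [← PySem.List.mem_sorted (key := key) (rev := false)]; exact ha)
      b (by rw [← PySem.List.mem_sorted (key := key) (rev := false)]; exact hb) heq) h.2

theorem pvRank_congr {x y : String} (h : pvStrPart x = pvStrPart y) : pvRank x = pvRank y := by
  simp only [pvRank, h]

theorem a_perm_and_pairwise (cols : List String) :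
    (sort_cols_py cols).Perm cols ∧
    (sort_cols_py cols).Pairwise (fun a b => pvKey a ≤ pvKey b) := by
  unfold sort_cols_py
  rw [dicts_eq]
  set ld := cols.filter pvIsDef with hld
  set lc := cols.filter (fun c => !pvIsDef c) with hlc
  have hcovd : ∀ c ∈ ld, pvStrPart c ∈ (pvGroupDict ld).keys := by
    intro c hc
    rw [mem_pvGroupDict_keys]
    exact List.mem_map_of_mem hc
  have hcovc : ∀ c ∈ lc, pvStrPart c ∈ (pvGroupDict lc).keys := by
    intro c hc
    rw [mem_pvGroupDict_keys]
    exact List.mem_map_of_mem hc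
  have hkd : ∀ k ∈ (pvGroupDict ld).keys, pvDefaultCols.contains k = true := by
    intro k hk
    rw [mem_pvGroupDict_keys, List.mem_map] at hk
    obtain ⟨c, hc, rfl⟩ := hk
    rw [hld, List.mem_filter] at hc
    simpa [pvIsDef] using hc.2
  have hkc : ∀ k ∈ (pvGroupDict lc).keys, pvDefaultCols.contains k = false := by
    intro k hk
    rw [mem_pvGroupDict_keys, List.mem_map] at hk
    obtain ⟨c, hc, rfl⟩ := hk
    rw [hlc, List.mem_filter] at hc
    simpa [pvIsDef] using hc.2
  -- rank facts for members
  have hrankd : ∀ k ∈ (pvGroupDict ld).keys, ∀ x ∈ ld, pvStrPart x = k → pvRank x = pvIdxA k := by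
    intro k hk x _ hxk
    rw [← hxk] at hk ⊢
    exact pvRank_of_default (by simpa using hkd _ hk)
  have hrankc : ∀ k ∈ (pvGroupDict lc).keys, ∀ x ∈ lc, pvStrPart x = k → pvRank x = 7 := by
    intro k hk x _ hxk
    refine pvRank_of_custom ?_
    rw [hxk]
    simpa using hkc k hk
  constructor
  · -- permutation
    exact (List.Perm.append (half_perm ld pvIdxA hcovd)
      (half_perm lc (fun k => k) hcovc)).trans (List.filter_append_perm _ cols)
  · -- pairwise
    rw [List.pairwise_append]
    refine ⟨?_, ?_, ?_⟩
    · -- default half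
      refine half_pairwise ld pvIdxA ?_ ?_
      · have hstrict := sorted_keys_strict (pvGroupDict ld).keys pvIdxA
          (pvGroupDict_keys_nodup ld)
          (fun k hk k' hk' he => pvIdxA_inj (by simpa using hkd k hk) (by simpa using hkd k' hk') he)
        have hmemkeys : ∀ k ∈ PySem.List.sorted (pvGroupDict ld).keys pvIdxA,
            k ∈ (pvGroupDict ld).keys := by
          intro k hk
          rw [PySem.List.mem_sorted] at hk
          exact hk
        refine hstrict.imp_of_mem ?_
        intro k1 k2 hk1 hk2 hlt x hx y hy hxk hyk
        have hrx : pvRank x = pvIdxA k1 := hrankd k1 (hmemkeys _ hk1) x hx hxk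
        have hry : pvRank y = pvIdxA k2 := hrankd k2 (hmemkeys _ hk2) y hy hyk
        rw [pvKey, pvKey, Prod.Lex.lt_iff]
        exact Or.inl (by simpa [hrx, hry] using hlt)
      · intro k x y _ _ hxk hyk hxy
        rw [pvKey, pvKey, Prod.Lex.le_iff]
        refine Or.inr ⟨by simp [pvRank_congr (hxk.trans hyk.symm)], ?_⟩
        rw [Prod.Lex.le_iff]
        rcases lt_or_eq_of_le hxy with h | h
        · rcases lt_or_eq_of_le (le_of_eq (hxk.trans hyk.symm)) with h' | h'
          · exact Or.inl (by simpa using h')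
          · exact Or.inr ⟨by simpa using hxk.trans hyk.symm, le_of_lt (by simpa using h)⟩
        · exact Or.inr ⟨by simpa using hxk.trans hyk.symm, le_of_eq (by simpa using h)⟩
    · -- custom half
      refine half_pairwise lc (fun k => k) ?_ ?_
      · have hstrict := sorted_keys_strict (pvGroupDict lc).keys (fun k => k)
          (pvGroupDict_keys_nodup lc) (fun k _ k' _ he => he)
        have hmemkeys : ∀ k ∈ PySem.List.sorted (pvGroupDict lc).keys (fun k => k),
            k ∈ (pvGroupDict lc).keys := by
          intro k hk
          rw [PySem.List.mem_sorted] at hk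
          exact hk
        refine hstrict.imp_of_mem ?_
        intro k1 k2 hk1 hk2 hlt x hx y hy hxk hyk
        have hrx : pvRank x = 7 := hrankc k1 (hmemkeys _ hk1) x hx hxk
        have hry : pvRank y = 7 := hrankc k2 (hmemkeys _ hk2) y hy hyk
        rw [pvKey, pvKey, Prod.Lex.lt_iff]
        refine Or.inr ⟨by simp [hrx, hry], ?_⟩
        rw [Prod.Lex.lt_iff]
        exact Or.inl (by simpa [hxk, hyk] using hlt)
      · intro k x y _ _ hxk hyk hxy
        rw [pvKey, pvKey, Prod.Lex.le_iff]
        refine Or.inr ⟨by simp [pvRank_congr (hxk.trans hyk.symm)], ?_⟩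
        rw [Prod.Lex.le_iff]
        rcases lt_or_eq_of_le hxy with h | h
        · rcases lt_or_eq_of_le (le_of_eq (hxk.trans hyk.symm)) with h' | h'
          · exact Or.inl (by simpa using h')
          · exact Or.inr ⟨by simpa using hxk.trans hyk.symm, le_of_lt (by simpa using h)⟩
        · exact Or.inr ⟨by simpa using hxk.trans hyk.symm, le_of_eq (by simpa using h)⟩
    · -- cross: default part strictly below custom part
      intro x hx y hy
      rw [List.mem_flatMap] at hx hy
      obtain ⟨k1, hk1, hxg⟩ := hx
      obtain ⟨k2, hk2, hyg⟩ := hy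
      rw [PySem.List.mem_sorted] at hk1 hk2
      obtain ⟨hxl, hxk⟩ := mem_group hxg
      obtain ⟨hyl, hyk⟩ := mem_group hyg
      have hrx : pvRank x = pvIdxA k1 := hrankd k1 hk1 x hxl hxk
      have hry : pvRank y = 7 := hrankc k2 hk2 y hyl hyk
      rw [pvKey, pvKey, Prod.Lex.le_iff]
      exact Or.inl (by rw [hrx, hry]; simpa using pvIdxA_lt (by simpa using hkd k1 hk1))

-- ===== VERDICT (by name: the statement is the Claim_ definition above) =====
theorem sort_cols_py_spec : Claim_equal_sort_cols_py := by
  intro cols _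
  unfold Spec_sort_cols_py
  obtain ⟨hperm, hpw⟩ := a_perm_and_pairwise cols
  exact PySem.List.eq_of_perm_of_pairwise_le_of_injective pvKey pvKey_injective
    (hperm.trans (alt_perm cols).symm) hpw (alt_pairwise cols)
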